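-- pv_equiv track=rewrite | github.com/JuanoYolo/PythonPractices | 26 lista.py | solution
-- ===== SOURCE A (Python) =====
-- def solution(inputArray):
--     res = inputArray[0] * inputArray[1]
--     cont = 0
--     lis = []
--     for i in range(len(inputArray)-1):
--         cont = inputArray[i+1] * inputArray[i]
--         lis.append(cont)
--
--     return max(lis)
-- ===== SOURCE B (Python) =====
-- def solution(inputArray):
--     def best(lo, hi):
--         # max of inputArray[i] * inputArray[i + 1] over lo <= i < hi
--         if hi - lo <= 1:
--             return inputArray[lo] * inputArray[lo + 1]
--         mid = (lo + hi) // 2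
--         return max(best(lo, mid), best(mid, hi))
--     return best(0, len(inputArray) - 1)
-- ===== Notes on version B (the rewrite author's own statement) =====
-- stated objective: alternative
-- what changed: B computes the maximum adjacent product by divide and conquer on index ranges (recursively splitting at the midpoint) instead of A's single indexed loop that materializes the full product list and calls max on it.
import Mathlib
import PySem

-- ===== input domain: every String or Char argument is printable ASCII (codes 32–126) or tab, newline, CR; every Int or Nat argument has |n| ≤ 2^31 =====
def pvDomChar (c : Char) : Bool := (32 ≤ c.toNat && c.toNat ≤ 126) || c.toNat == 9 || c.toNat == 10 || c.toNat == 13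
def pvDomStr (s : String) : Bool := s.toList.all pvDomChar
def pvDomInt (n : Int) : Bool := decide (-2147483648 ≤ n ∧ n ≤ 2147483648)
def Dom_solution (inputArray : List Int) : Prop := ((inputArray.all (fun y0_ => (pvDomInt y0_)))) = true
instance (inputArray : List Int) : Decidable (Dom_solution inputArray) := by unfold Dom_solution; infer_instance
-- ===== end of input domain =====

-- B finds the maximum adjacent product by divide and conquer on index ranges instead of building the product list and calling max.

-- ===== PORT A =====
def solution (inputArray : List Int) : Int :=
  let _res := PySem.List.pyGetD inputArray 0 0 * PySem.List.pyGetD inputArray 1 0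
  let lis := (PySem.List.pyRange 0 ((inputArray.length : Int) - 1) 1).foldl
    (fun l i => l ++ [PySem.List.pyGetD inputArray (i + 1) 0 * PySem.List.pyGetD inputArray i 0]) []
  (PySem.List.max? lis (fun y => y)).getD 0

-- ===== PORT B =====
-- 'best(lo, hi)' from Source B: max of a[i]*a[i+1] over lo ≤ i < hi, by splitting at the midpoint.
def solutionBest (a : List Int) (lo hi : Int) : Int :=
  if hle : hi - lo ≤ 1 then
    PySem.List.pyGetD a lo 0 * PySem.List.pyGetD a (lo + 1) 0
  else
    let mid := PySem.Int.floordiv (lo + hi) 2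
    max (solutionBest a lo mid) (solutionBest a mid hi)
termination_by (hi - lo).toNat
decreasing_by
  · have hfd : (lo + hi).fdiv 2 = (lo + hi) / 2 := by rw [Int.fdiv_eq_ediv]; simp
    simp only [PySem.Int.floordiv, hfd] at *
    omega
  · have hfd : (lo + hi).fdiv 2 = (lo + hi) / 2 := by rw [Int.fdiv_eq_ediv]; simp
    simp only [PySem.Int.floordiv, hfd] at *
    omega

def solution_alt (inputArray : List Int) : Int :=
  solutionBest inputArray 0 ((inputArray.length : Int) - 1)

-- ===== PRECONDITION & SPEC =====
-- Pre_ excludes lists of length < 2: there A raises IndexError on inputArray[1] (B raises IndexError too).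
def Pre_solution (inputArray : List Int) : Prop := 2 ≤ inputArray.length
instance (inputArray : List Int) : Decidable (Pre_solution inputArray) := by unfold Pre_solution; infer_instance
def pvWitness_solution : List Int := [3, -2, 5]
def Spec_solution (inputArray : List Int) (out : Int) : Prop := out = solution_alt inputArray
instance (inputArray : List Int) (out : Int) : Decidable (Spec_solution inputArray out) := by unfold Spec_solution; infer_instance

-- ===== CLAIM =====
def Claim_equal_solution : Prop := ∀ (inputArray : List Int), Dom_solution inputArray → Pre_solution inputArray → Spec_solution inputArray (solution inputArray)

-- ===== LEMMAS AND PROOFS =====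

-- max of a nonempty list, head-seeded
def pvNMax : List Int → Int
  | [] => 0
  | x :: xs => xs.foldl max x

theorem pv_foldl_max_init (l : List Int) : ∀ a b : Int,
    List.foldl max (max a b) l = max a (List.foldl max b l) := by
  induction l with
  | nil => intro a b; simp
  | cons c l ih =>
    intro a b
    simp only [List.foldl_cons]
    rw [max_assoc, ih]

theorem pv_nmax_append (x y : Int) (xs ys : List Int) :
    pvNMax (x :: xs ++ y :: ys) = max (pvNMax (x :: xs)) (pvNMax (y :: ys)) := by
  simp only [pvNMax, List.cons_append, List.foldl_append, List.foldl_cons]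
  exact pv_foldl_max_init ys _ y

-- B's recursion computes the head-seeded max of the mapped index range.
theorem pv_best_eq (a : List Int) (f : Int → Int)
    (hf : ∀ i : Int, f i = PySem.List.pyGetD a i 0 * PySem.List.pyGetD a (i + 1) 0) :
    ∀ (n : Nat) (lo hi : Int), (hi - lo).toNat ≤ n → lo < hi →
    solutionBest a lo hi = pvNMax ((PySem.List.pyRange lo hi 1).map f) := by
  intro n
  induction n with
  | zero => intro lo hi hn hlt; omega
  | succ n ih =>
    intro lo hi hn hlt
    by_cases hle : hi - lo ≤ 1
    · have hh : hi = lo + 1 := by omega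
      subst hh
      rw [solutionBest]
      simp [PySem.List.pyRange_one_singleton, pvNMax, hf lo]
    · rw [solutionBest]
      simp only [hle, dite_false]
      have hfd : (lo + hi).fdiv 2 = (lo + hi) / 2 := by rw [Int.fdiv_eq_ediv]; simp
      set mid := PySem.Int.floordiv (lo + hi) 2 with hmiddef
      have hmid : mid = (lo + hi) / 2 := by rw [hmiddef, PySem.Int.floordiv, hfd]
      have hlm : lo < mid := by omega
      have hmh : mid < hi := by omega
      rw [ih lo mid (by omega) hlm, ih mid hi (by omega) hmh,
        PySem.List.pyRange_one_append lo mid hi (by omega) (by omega),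
        PySem.List.pyRange_one_cons hlm, PySem.List.pyRange_one_cons hmh]
      simp only [List.map_append, List.map_cons]
      exact (pv_nmax_append _ _ _ _).symm

-- A's loop builds exactly the list of adjacent products over the index range.
theorem pv_lis_eq_map (a : List Int) :
    (PySem.List.pyRange 0 ((a.length : Int) - 1) 1).foldl
      (fun l i => l ++ [PySem.List.pyGetD a (i + 1) 0 * PySem.List.pyGetD a i 0]) []
    = (PySem.List.pyRange 0 ((a.length : Int) - 1) 1).map
        (fun i => PySem.List.pyGetD a (i + 1) 0 * PySem.List.pyGetD a i 0) := by
  simpa using PySem.List.foldl_append_singleton_eq_map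
    (fun i => PySem.List.pyGetD a (i + 1) 0 * PySem.List.pyGetD a i 0)
    (PySem.List.pyRange 0 ((a.length : Int) - 1) 1) []

-- ===== VERDICT =====
theorem solution_spec : Claim_equal_solution := by
  intro a _ hpre
  have hlen : (0 : Int) < (a.length : Int) - 1 := by
    unfold Pre_solution at hpre
    omega
  unfold Spec_solution solution solution_alt
  rw [pv_best_eq a (fun i => PySem.List.pyGetD a i 0 * PySem.List.pyGetD a (i + 1) 0)
      (fun _ => rfl) ((a.length : Int) - 1 - 0).toNat 0 _ le_rfl hlen]
  simp only [pv_lis_eq_map]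
  rw [PySem.List.pyRange_one_cons hlen]
  simp only [List.map_cons, PySem.List.max?_id_cons, Option.getD_some, pvNMax,
    List.foldl_map]
  congr 1
  · funext x y
    rw [mul_comm (PySem.List.pyGetD a (y + 1) 0)]
  · rw [mul_comm]
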